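-- pv_equiv track=rewrite | github.com/rkudipud/chopper | tests/property/test_determinism.py | _bfs_visit
-- ===== SOURCE A (Python) =====
-- from collections import deque
--
-- def _bfs_visit(seeds: list[str], adjacency: dict[str, list[str]]) -> list[str]:
--     """Lex-sorted BFS mirroring the tracer contract."""
--     visited: set[str] = set()
--     order: list[str] = []
--     frontier: deque[str] = deque(sorted(seeds))
--     while frontier:
--         layer = sorted(set(frontier))
--         frontier.clear()
--         next_layer: list[str] = []
--         for node in layer:
--             if node in visited:
--                 continue
--             visited.add(node)
--             order.append(node)
--             # Expand this node's neighbours into the next layer, with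
--             # the same lex-sort contract.
--             for nbr in sorted(set(adjacency.get(node, ()))):
--                 if nbr not in visited:
--                     next_layer.append(nbr)
--         frontier.extend(sorted(set(next_layer)))
--     return order
-- ===== SOURCE B (Python) =====
-- from collections import deque
--
-- def _bfs_visit(seeds: list[str], adjacency: dict[str, list[str]]) -> list[str]:
--     """Queue BFS with a distance map and one final (distance, name) sort.
--
--     No sorting happens during the traversal: a classic single-FIFO BFS
--     assigns each reachable node its minimal distance from the seed set,
--     and one final sort by (distance, name) produces the lex-sorted
--     layered order."""
--     dist: dict[str, int] = {}
--     queue: deque[str] = deque()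
--     for s in seeds:
--         if s not in dist:
--             dist[s] = 0
--             queue.append(s)
--     while queue:
--         u = queue.popleft()
--         d = dist[u] + 1
--         for v in adjacency.get(u, ()):
--             if v not in dist:
--                 dist[v] = d
--                 queue.append(v)
--     return sorted(dist, key=lambda n: (dist[n], n))
-- ===== Notes on version B (the rewrite author's own statement) =====
-- stated objective: alternative
-- what changed: A interleaves ordering with traversal (layered frontier BFS that sorts each deduplicated layer and each node's neighbour set while emitting the order); B does no sorting during traversal at all: a classic single-FIFO queue BFS records each reachable node's minimal distance in a dict, and one final sort by (distance, name) produces the order.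
import Mathlib
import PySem

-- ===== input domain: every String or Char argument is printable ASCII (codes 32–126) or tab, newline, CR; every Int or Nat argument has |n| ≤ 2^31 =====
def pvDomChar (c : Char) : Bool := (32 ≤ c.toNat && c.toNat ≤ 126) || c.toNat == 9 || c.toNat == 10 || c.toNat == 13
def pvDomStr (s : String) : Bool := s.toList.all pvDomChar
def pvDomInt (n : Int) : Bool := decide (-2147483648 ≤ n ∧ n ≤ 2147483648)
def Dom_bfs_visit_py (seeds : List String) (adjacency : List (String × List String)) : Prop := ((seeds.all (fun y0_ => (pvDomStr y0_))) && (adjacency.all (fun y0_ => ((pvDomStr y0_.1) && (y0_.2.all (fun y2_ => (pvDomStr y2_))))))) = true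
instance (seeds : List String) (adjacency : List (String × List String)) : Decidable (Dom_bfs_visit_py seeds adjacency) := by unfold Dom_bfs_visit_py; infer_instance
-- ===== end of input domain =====

-- B replaces A's interleaved sort-each-layer-while-visiting traversal by a classic single-FIFO
-- queue BFS that records minimal distances in a dict (no sorting during traversal), followed by
-- ONE final sort by (distance, name).

-- ===== PORT A =====

-- adjacency.get(node, ()) — used by both Pythons
def pvAdjGet (adjacency : List (String × List String)) (node : String) : List String :=
  (PySem.Dict.mk adjacency).getD node []

-- body of A's 'for node in layer' loop; state = (visited, order, next_layer)
def bfsAStep (adjacency : List (String × List String))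
    (st : PySem.Set String × List String × List String) (node : String) :
    PySem.Set String × List String × List String :=
  if PySem.Set.contains st.1 node then st
  else
    let visited := PySem.Set.add st.1 node
    let order := st.2.1 ++ [node]
    let nbrs := PySem.List.sorted (PySem.Set.ofList (pvAdjGet adjacency node)) (fun x => x) false
    let nextLayer := nbrs.foldl
      (fun acc nbr => if !(PySem.Set.contains visited nbr) then acc ++ [nbr] else acc) st.2.2
    (visited, order, nextLayer)

-- A's 'while frontier' loop; the fuel (strictly more than the possible number of
-- iterations, proved in pvMainQ/bfs_visit_py_spec below) only makes the recursion structural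
def bfsALoop (adjacency : List (String × List String)) :
    Nat → PySem.Set String × List String × List String → List String
  | 0, st => st.2.1
  | f+1, st =>
    if st.2.2 = [] then st.2.1
    else
      let layer := PySem.List.sorted (PySem.Set.ofList st.2.2) (fun x => x) false
      let st' := layer.foldl (bfsAStep adjacency) (st.1, st.2.1, [])
      bfsALoop adjacency f (st'.1, st'.2.1, PySem.List.sorted (PySem.Set.ofList st'.2.2) (fun x => x) false)

def bfs_visit_py (seeds : List String) (adjacency : List (String × List String)) : List String :=
  bfsALoop adjacency (seeds.length + (adjacency.map (fun p => p.2.length)).sum + 2)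
    (PySem.Set.empty, [], PySem.List.sorted seeds (fun x => x) false)

-- ===== PORT B =====

-- 'if x not in dist: dist[x] = val; queue.append(x)' — the discovery step of Source B,
-- used both for the seed loop (val = 0) and for a popped node's neighbours (val = dist[u]+1)
def pvQInner (val : Int) (st : PySem.Dict String Int × List String) (v : String) :
    PySem.Dict String Int × List String :=
  if st.1.contains v then st else (st.1.insert v val, st.2 ++ [v])

-- processing of one popped node u (queue already popped): scan u's neighbours
def pvQStep (adjacency : List (String × List String))
    (st : PySem.Dict String Int × List String) (u : String) :
    PySem.Dict String Int × List String :=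
  (pvAdjGet adjacency u).foldl (pvQInner (st.1.getD u 0 + 1)) st

-- Source B's 'while queue' loop; fuel bounds the number of pops (each popped node was
-- inserted into dist exactly once, see bfs_visit_py_spec below)
def bfsQLoop (adjacency : List (String × List String)) :
    Nat → PySem.Dict String Int × List String → PySem.Dict String Int
  | 0, st => st.1
  | f+1, st =>
    match st.2 with
    | [] => st.1
    | u :: q => bfsQLoop adjacency f (pvQStep adjacency (st.1, q) u)

def bfs_visit_py_alt (seeds : List String) (adjacency : List (String × List String)) : List String :=
  let st0 := seeds.foldl (pvQInner 0) (PySem.Dict.empty, [])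
  let dist := bfsQLoop adjacency (seeds.length + (adjacency.map (fun p => p.2.length)).sum + 2) st0
  PySem.List.sorted2 dist.keys (fun n => dist.getD n 0) (fun n => n) false

-- ===== PRECONDITION & SPEC =====
def Spec_bfs_visit_py (seeds : List String) (adjacency : List (String × List String)) (out : List String) : Prop := out = bfs_visit_py_alt seeds adjacency
instance (seeds : List String) (adjacency : List (String × List String)) (out : List String) : Decidable (Spec_bfs_visit_py seeds adjacency out) := by unfold Spec_bfs_visit_py; infer_instance

-- ===== CLAIM (what is proved, stated in full; the proofs are below) =====
def Claim_equal_bfs_visit_py : Prop := ∀ (seeds : List String) (adjacency : List (String × List String)), Dom_bfs_visit_py seeds adjacency → Spec_bfs_visit_py seeds adjacency (bfs_visit_py seeds adjacency)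

-- ===== LEMMAS AND PROOFS =====

-- the lexicographic (distance, name) order B's final sort uses, as a Prop on names
def pvLex (dist : PySem.Dict String Int) (a b : String) : Prop :=
  dist.getD a 0 < dist.getD b 0 ∨ (dist.getD a 0 = dist.getD b 0 ∧ a < b)

theorem pvSorted2_eq_sorted_toLex (xs : List String) (k1 : String → Int) :
    PySem.List.sorted2 xs k1 (fun n => n) false =
    PySem.List.sorted xs (fun n => toLex (k1 n, n)) false := by
  rw [PySem.List.sorted_eq_foldl_insertBy]
  show List.foldl (fun acc x => PySem.List.insertBy _ x acc) [] xs = _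
  simp only [if_neg (by decide : ¬ (false = true))]
  congr 1
  funext acc x
  congr 1
  funext a b
  have h : (toLex (k1 a, a) < toLex (k1 b, b)) ↔ (k1 a < k1 b ∨ (k1 a = k1 b ∧ a < b)) := by
    rw [Prod.Lex.lt_iff]; rfl
  rw [show (decide (toLex (k1 a, a) < toLex (k1 b, b))) = decide (k1 a < k1 b ∨ (k1 a = k1 b ∧ a < b)) by
    rcases Decidable.em (toLex (k1 a, a) < toLex (k1 b, b)) with hc | hc
    · rw [decide_eq_true hc, decide_eq_true (h.mp hc)]
    · rw [decide_eq_false hc, decide_eq_false (fun hx => hc (h.mpr hx))]]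
  rcases lt_trichotomy (k1 a) (k1 b) with hlt | heq | hgt
  · simp [hlt]
  · simp [heq]
  · simp [hgt, not_lt.mpr (le_of_lt hgt), ne_of_gt hgt]

-- at the end of either loop: the final sort of the distance table is the already-emitted order
theorem pvFinish (dist : PySem.Dict String Int) (ord : List String)
    (hperm : ord.Perm dist.keys) (h5 : ord.Pairwise (pvLex dist)) :
    PySem.List.sorted2 dist.keys (fun n => dist.getD n 0) (fun n => n) false = ord := by
  rw [pvSorted2_eq_sorted_toLex]
  refine PySem.List.sorted_eq_of_perm_of_pairwise_lt _ _ _ hperm ?_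
  refine h5.imp ?_
  intro a b hab
  rw [Prod.Lex.lt_iff]
  exact hab

theorem pvContainsIff (V : List String) (x : String) :
    PySem.Set.contains V x = true ↔ x ∈ V := by simp [PySem.Set.contains]

theorem pvMemFilter (V l : List String) (x : String) :
    x ∈ l.filter (fun m => !PySem.Set.contains V m) ↔ x ∈ l ∧ x ∉ V := by
  simp [PySem.Set.contains]

theorem pvInnerAll (adjacency : List (String × List String)) :
    ∀ (L : List String) (st : PySem.Set String × List String × List String),
    (∀ n ∈ L, PySem.Set.contains st.1 n = true) →
    L.foldl (bfsAStep adjacency) st = st := by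
  intro L
  induction L with
  | nil => intro st _; rfl
  | cons n t ih =>
    intro st h
    have hn := h n (by simp)
    simp only [List.foldl_cons]
    rw [show bfsAStep adjacency st n = st by
      simp only [bfsAStep]; rw [if_pos hn]]
    exact ih st (fun m hm => h m (by simp [hm]))

theorem pvStepFresh (adjacency : List (String × List String)) (V NL : List String) (n : String)
    (hv : ¬ PySem.Set.contains V n = true) :
    bfsAStep adjacency (V, V, NL) n =
      (V ++ [n], V ++ [n],
        NL ++ (PySem.List.sorted (PySem.Set.ofList (pvAdjGet adjacency n)) (fun x => x) false).filter
          (fun nbr => !(PySem.Set.contains (V ++ [n]) nbr))) := by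
  have hadd : PySem.Set.add V n = V ++ [n] := by
    simp only [PySem.Set.add]; rw [if_neg hv]
  simp only [bfsAStep]
  rw [if_neg hv]
  simp only [hadd, PySem.List.foldl_append_if_eq_filter]

theorem pvInner (adjacency : List (String × List String)) :
    ∀ (L : List String) (V NL : List String), L.Nodup →
    ((L.foldl (bfsAStep adjacency) (V, V, NL)).1 = V ++ L.filter (fun n => !(PySem.Set.contains V n)) ∧
     (L.foldl (bfsAStep adjacency) (V, V, NL)).2.1 = V ++ L.filter (fun n => !(PySem.Set.contains V n))) ∧
    (∀ x, x ∉ V ++ L.filter (fun n => !(PySem.Set.contains V n)) →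
      (x ∈ (L.foldl (bfsAStep adjacency) (V, V, NL)).2.2 ↔
        x ∈ NL ∨ ∃ n ∈ L.filter (fun n => !(PySem.Set.contains V n)), x ∈ pvAdjGet adjacency n)) := by
  intro L
  induction L with
  | nil => intro V NL _; simp
  | cons n t ih =>
    intro V NL hnd
    have hndt : t.Nodup := (List.nodup_cons.mp hnd).2
    have hnt : n ∉ t := (List.nodup_cons.mp hnd).1
    by_cases hv : PySem.Set.contains V n = true
    · -- n already visited
      have hstep : bfsAStep adjacency (V, V, NL) n = (V, V, NL) := by
        simp only [bfsAStep]; rw [if_pos hv]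
      have hfil : (n :: t).filter (fun m => !(PySem.Set.contains V m)) =
          t.filter (fun m => !(PySem.Set.contains V m)) := by
        rw [List.filter_cons, if_neg (by rw [hv]; decide)]
      simp only [List.foldl_cons, hstep, hfil]
      exact ih V NL hndt
    · -- n fresh
      have hmemV : n ∉ V := fun h => hv ((pvContainsIff V n).mpr h)
      have hfilcong : t.filter (fun m => !(PySem.Set.contains (V ++ [n]) m)) =
          t.filter (fun m => !(PySem.Set.contains V m)) := by
        apply List.filter_congr
        intro m hm
        have hmn : m ≠ n := fun h => hnt (h ▸ hm)
        simp [PySem.Set.contains, hmn]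
      have hfil : (n :: t).filter (fun m => !(PySem.Set.contains V m)) =
          n :: t.filter (fun m => !(PySem.Set.contains V m)) := by
        rw [List.filter_cons, if_pos (by simp [PySem.Set.contains, hmemV])]
      set NBR := (PySem.List.sorted (PySem.Set.ofList (pvAdjGet adjacency n)) (fun x => x) false).filter
          (fun nbr => !(PySem.Set.contains (V ++ [n]) nbr)) with hNBR
      have ihh := ih (V ++ [n]) (NL ++ NBR) hndt
      simp only [List.foldl_cons, pvStepFresh adjacency V NL n hv, ← hNBR]
      rw [hfil]
      have hNBRmem : ∀ x, x ∈ NBR ↔ (x ∈ pvAdjGet adjacency n ∧ x ∉ V ++ [n]) := by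
        intro x
        rw [hNBR]
        constructor
        · intro h
          rcases List.mem_filter.mp h with ⟨h1, h2⟩
          refine ⟨by simpa [PySem.List.mem_sorted, PySem.Set.mem_ofList] using h1, ?_⟩
          intro hmem
          rw [(pvContainsIff _ x).mpr hmem] at h2
          simp at h2
        · intro ⟨h1, h2⟩
          refine List.mem_filter.mpr ⟨by simpa [PySem.List.mem_sorted, PySem.Set.mem_ofList] using h1, ?_⟩
          simp [PySem.Set.contains]
          simpa using h2
      constructor
      · constructor
        · rw [ihh.1.1, hfilcong]; simp
        · rw [ihh.1.2, hfilcong]; simp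
      · intro x hx
        have hxV : x ∉ V := by intro h; exact hx (by simp [h])
        have hxn : x ≠ n := by intro h; exact hx (by simp [h])
        have hxt : x ∉ t.filter (fun m => !(PySem.Set.contains V m)) := by
          intro h
          rcases (pvMemFilter V t x).mp h with ⟨h1, h2⟩
          exact hx (by simp [h1, h2])
        have hx' : x ∉ (V ++ [n]) ++ t.filter (fun m => !(PySem.Set.contains (V ++ [n]) m)) := by
          rw [hfilcong]
          intro h
          rcases List.mem_append.mp h with h | h
          · rcases List.mem_append.mp h with h | h
            · exact hxV h
            · exact hxn (by simpa using h)
          · exact hxt h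
        rw [(ihh.2 x hx'), hfilcong]
        constructor
        · rintro (h | h)
          · rcases List.mem_append.mp h with h | h
            · exact Or.inl h
            · rcases (hNBRmem x).mp h with ⟨h1, _⟩
              exact Or.inr ⟨n, List.mem_cons_self .., h1⟩
          · rcases h with ⟨m, hm, hxm⟩
            exact Or.inr ⟨m, List.mem_cons_of_mem _ hm, hxm⟩
        · rintro (h | h)
          · exact Or.inl (List.mem_append.mpr (Or.inl h))
          · rcases h with ⟨m, hm, hxm⟩
            rcases List.mem_cons.mp hm with rfl | hm
            · refine Or.inl (List.mem_append.mpr (Or.inr ?_))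
              refine (hNBRmem x).mpr ⟨hxm, ?_⟩
              intro h
              rcases List.mem_append.mp h with h | h
              · exact hxV h
              · exact hxn (by simpa using h)
            · exact Or.inr ⟨m, hm, hxm⟩

theorem pvGetDFoldlInsert (val : Int) :
    ∀ (l : List String) (d : PySem.Dict String Int) (x : String) (d0 : Int),
    (l.foldl (fun d n => d.insert n val) d).getD x d0 = if x ∈ l then val else d.getD x d0 := by
  intro l
  induction l with
  | nil => intro d x d0; simp
  | cons n t ih =>
    intro d x d0
    simp only [List.foldl_cons, ih]
    by_cases hx : x ∈ t
    · simp [hx]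
    · by_cases hxn : x = n
      · simp [hxn]
      · simp [hx, hxn, PySem.Dict.getD_insert]

theorem pvKeysFoldlInsert (val : Int) :
    ∀ (l : List String) (d : PySem.Dict String Int), l.Nodup → (∀ x ∈ l, x ∉ d.keys) →
    (l.foldl (fun d n => d.insert n val) d).keys = d.keys ++ l := by
  intro l
  induction l with
  | nil => intro d _ _; simp
  | cons n t ih =>
    intro d hnd hfresh
    simp only [List.foldl_cons]
    rw [ih (d.insert n val) (List.nodup_cons.mp hnd).2 ?fresh]
    · rw [PySem.Dict.keys_insert_of_not_contains]
      · simp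
      · rw [← Bool.not_eq_true, PySem.Dict.contains_iff_mem_keys]
        exact hfresh n (by simp)
    case fresh =>
      intro x hx
      rw [PySem.Dict.mem_keys_insert]
      rintro (rfl | h)
      · exact (List.nodup_cons.mp hnd).1 hx
      · exact hfresh x (by simp [hx]) h

theorem pvAdjGetSub (adjacency : List (String × List String)) (n x : String)
    (h : x ∈ pvAdjGet adjacency n) : x ∈ adjacency.flatMap (fun p => p.2) := by
  unfold pvAdjGet at h
  rw [PySem.Dict.getD_eq_get?_getD] at h
  cases hg : (PySem.Dict.mk adjacency).get? n with
  | none => rw [hg] at h; simp at h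
  | some v =>
    rw [hg] at h
    simp only [Option.getD_some] at h
    have hmem := PySem.Dict.mem_items_of_get?_eq_some _ hg
    exact List.mem_flatMap.mpr ⟨(n, v), hmem, h⟩

theorem pvALoopNil (adjacency : List (String × List String)) (f : Nat)
    (v o : List String) : bfsALoop adjacency f (v, o, []) = o := by
  cases f <;> simp [bfsALoop]

theorem pvQNil (adjacency : List (String × List String)) (f : Nat)
    (d : PySem.Dict String Int) : bfsQLoop adjacency f (d, []) = d := by
  cases f <;> rfl

-- characterisation of the discovery fold (seed loop and neighbour loop of Source B):
-- it inserts exactly the fresh elements, in order, once each, and appends them to the queue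
theorem pvInnerQ (val : Int) :
    ∀ (nbrs : List String) (d : PySem.Dict String Int) (acc : List String),
    ∃ A : List String,
      nbrs.foldl (pvQInner val) (d, acc) = (A.foldl (fun dd x => dd.insert x val) d, acc ++ A) ∧
      A.Nodup ∧ (∀ x, x ∈ A ↔ (x ∈ nbrs ∧ x ∉ d.keys)) := by
  intro nbrs
  induction nbrs with
  | nil => intro d acc; exact ⟨[], by simp, List.nodup_nil, by simp⟩
  | cons v t ih =>
    intro d acc
    by_cases hc : d.contains v = true
    · have hvk : v ∈ d.keys := (PySem.Dict.contains_iff_mem_keys d v).mp hc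
      have hstep : pvQInner val (d, acc) v = (d, acc) := by
        simp only [pvQInner]; rw [if_pos hc]
      obtain ⟨A, hA, hnd, hmem⟩ := ih d acc
      refine ⟨A, ?_, hnd, ?_⟩
      · simp only [List.foldl_cons, hstep, hA]
      · intro x
        rw [hmem x]
        constructor
        · rintro ⟨h1, h2⟩; exact ⟨List.mem_cons_of_mem _ h1, h2⟩
        · rintro ⟨h1, h2⟩
          rcases List.mem_cons.mp h1 with rfl | h1
          · exact absurd hvk h2
          · exact ⟨h1, h2⟩
    · have hvk : v ∉ d.keys := fun h => hc ((PySem.Dict.contains_iff_mem_keys d v).mpr h)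
      have hstep : pvQInner val (d, acc) v = (d.insert v val, acc ++ [v]) := by
        simp only [pvQInner]; rw [if_neg hc]
      obtain ⟨A, hA, hnd, hmem⟩ := ih (d.insert v val) (acc ++ [v])
      refine ⟨v :: A, ?_, ?_, ?_⟩
      · simp only [List.foldl_cons, hstep, hA, List.append_assoc, List.singleton_append]
      · refine List.nodup_cons.mpr ⟨?_, hnd⟩
        intro hvA
        exact ((hmem v).mp hvA).2 ((PySem.Dict.mem_keys_insert d v v val).mpr (Or.inl rfl))
      · intro x
        constructor
        · intro hx
          rcases List.mem_cons.mp hx with rfl | hx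
          · exact ⟨List.mem_cons_self .., hvk⟩
          · rcases (hmem x).mp hx with ⟨h1, h2⟩
            refine ⟨List.mem_cons_of_mem _ h1, fun hk => h2 ?_⟩
            exact (PySem.Dict.mem_keys_insert d v x val).mpr (Or.inr hk)
        · rintro ⟨h1, h2⟩
          rcases List.mem_cons.mp h1 with rfl | h1
          · exact List.mem_cons_self ..
          · by_cases hxv : x = v
            · exact hxv ▸ List.mem_cons_self ..
            · refine List.mem_cons_of_mem _ ((hmem x).mpr ⟨h1, ?_⟩)
              intro hk
              rcases (PySem.Dict.mem_keys_insert d v x val).mp hk with h | h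
              · exact hxv h
              · exact h2 h
  

-- the discovery fold only appends to the queue: a queue prefix passes through unchanged
theorem pvQPrefix (val : Int) :
    ∀ (nbrs : List String) (d : PySem.Dict String Int) (X Y : List String),
    nbrs.foldl (pvQInner val) (d, X ++ Y) =
      ((nbrs.foldl (pvQInner val) (d, Y)).1, X ++ (nbrs.foldl (pvQInner val) (d, Y)).2) := by
  intro nbrs
  induction nbrs with
  | nil => intro d X Y; rfl
  | cons v t ih =>
    intro d X Y
    by_cases hc : d.contains v = true
    · simp only [List.foldl_cons, pvQInner]
      rw [if_pos hc, if_pos hc]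
      exact ih d X Y
    · simp only [List.foldl_cons, pvQInner]
      rw [if_neg hc, if_neg hc]
      rw [List.append_assoc]
      exact ih (d.insert v val) X (Y ++ [v])

theorem pvQCons (adjacency : List (String × List String)) (f : Nat)
    (d : PySem.Dict String Int) (u : String) (q : List String) :
    bfsQLoop adjacency (f+1) (d, u :: q) = bfsQLoop adjacency f (pvQStep adjacency (d, q) u) := rfl

-- flattening: running the queue loop through a whole block L equals folding pvQStep over L
theorem pvFlat (adjacency : List (String × List String)) :
    ∀ (L : List String) (f : Nat) (d : PySem.Dict String Int) (N : List String),
    bfsQLoop adjacency (f + L.length) (d, L ++ N) =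
      bfsQLoop adjacency f (L.foldl (pvQStep adjacency) (d, N)) := by
  intro L
  induction L with
  | nil => intro f d N; rfl
  | cons u t ih =>
    intro f d N
    have hshape : pvQStep adjacency (d, t ++ N) u =
        ((pvQStep adjacency (d, N) u).1, t ++ (pvQStep adjacency (d, N) u).2) := by
      simp only [pvQStep]
      exact pvQPrefix (d.getD u 0 + 1) (pvAdjGet adjacency u) d t N
    have h1 : bfsQLoop adjacency (f + (u :: t).length) (d, (u :: t) ++ N) =
        bfsQLoop adjacency (f + t.length) (pvQStep adjacency (d, t ++ N) u) :=
      pvQCons adjacency (f + t.length) d u (t ++ N)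
    rw [h1, hshape, ih (f) ((pvQStep adjacency (d, N) u).1) ((pvQStep adjacency (d, N) u).2)]
    simp only [List.foldl_cons]

-- one whole-layer macro step of the queue loop: starting from a queue holding exactly the
-- current layer (all at distance 'level'), it discovers the fresh neighbours once each
theorem pvMacro (adjacency : List (String × List String)) (level : Int) :
    ∀ (F : List String) (dist : PySem.Dict String Int) (acc : List String),
    (∀ u ∈ F, dist.getD u 0 = level ∧ u ∈ dist.keys) →
    ∃ A : List String,
      F.foldl (pvQStep adjacency) (dist, acc) =
        (A.foldl (fun dd x => dd.insert x (level+1)) dist, acc ++ A) ∧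
      A.Nodup ∧ (∀ x, x ∈ A ↔ ((∃ u ∈ F, x ∈ pvAdjGet adjacency u) ∧ x ∉ dist.keys)) := by
  intro F
  induction F with
  | nil => intro dist acc _; exact ⟨[], by simp, List.nodup_nil, by simp⟩
  | cons u t ih =>
    intro dist acc h
    have hu := h u (List.mem_cons_self ..)
    obtain ⟨Au, hAu, hndAu, hmemAu⟩ := pvInnerQ (level+1) (pvAdjGet adjacency u) dist acc
    have hfreshAu : ∀ x ∈ Au, x ∉ dist.keys := fun x hx => ((hmemAu x).mp hx).2
    have hstep : pvQStep adjacency (dist, acc) u =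
        (Au.foldl (fun dd x => dd.insert x (level+1)) dist, acc ++ Au) := by
      simp only [pvQStep, hu.1]
      exact hAu
    set dist1 := Au.foldl (fun dd x => dd.insert x (level+1)) dist with hdist1
    have hkeys1 : dist1.keys = dist.keys ++ Au :=
      pvKeysFoldlInsert (level+1) Au dist hndAu hfreshAu
    have hgetD1 : ∀ x d0, dist1.getD x d0 = if x ∈ Au then level+1 else dist.getD x d0 :=
      fun x d0 => pvGetDFoldlInsert (level+1) Au dist x d0
    have ht : ∀ u' ∈ t, dist1.getD u' 0 = level ∧ u' ∈ dist1.keys := by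
      intro u' hu'
      have hmem := (h u' (List.mem_cons_of_mem _ hu')).2
      have hnAu : u' ∉ Au := fun hx => hfreshAu u' hx hmem
      constructor
      · rw [hgetD1 u' 0, if_neg hnAu]
        exact (h u' (List.mem_cons_of_mem _ hu')).1
      · rw [hkeys1]; exact List.mem_append.mpr (Or.inl hmem)
    obtain ⟨At, hAt, hndAt, hmemAt⟩ := ih dist1 (acc ++ Au) ht
    refine ⟨Au ++ At, ?_, ?_, ?_⟩
    · simp only [List.foldl_cons, hstep, ← hdist1, hAt, List.foldl_append, List.append_assoc]
    · refine List.Nodup.append hndAu hndAt ?_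
      intro x hxAu hxAt
      have := ((hmemAt x).mp hxAt).2
      rw [hkeys1] at this
      exact this (List.mem_append.mpr (Or.inr hxAu))
    · intro x
      constructor
      · intro hx
        rcases List.mem_append.mp hx with hx | hx
        · rcases (hmemAu x).mp hx with ⟨h1, h2⟩
          exact ⟨⟨u, List.mem_cons_self .., h1⟩, h2⟩
        · rcases (hmemAt x).mp hx with ⟨⟨w, hw, hxw⟩, h2⟩
          rw [hkeys1] at h2
          exact ⟨⟨w, List.mem_cons_of_mem _ hw, hxw⟩,
            fun hk => h2 (List.mem_append.mpr (Or.inl hk))⟩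
      · rintro ⟨⟨w, hw, hxw⟩, h2⟩
        rcases List.mem_cons.mp hw with rfl | hw
        · exact List.mem_append.mpr (Or.inl ((hmemAu x).mpr ⟨hxw, h2⟩))
        · by_cases hxAu : x ∈ Au
          · exact List.mem_append.mpr (Or.inl hxAu)
          · refine List.mem_append.mpr (Or.inr ((hmemAt x).mpr ⟨⟨w, hw, hxw⟩, ?_⟩))
            rw [hkeys1]
            intro hk
            rcases List.mem_append.mp hk with hk | hk
            · exact h2 hk
            · exact hxAu hk

theorem pvMainQ (adjacency : List (String × List String)) :
    ∀ (fA fB : Nat) (dist : PySem.Dict String Int) (ord frontierA F : List String) (level : Int),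
    dist.keys.Perm (ord ++ F) →
    ord.Nodup → F.Nodup →
    (∀ x ∈ F, x ∉ ord) →
    (∀ x, x ∈ F ↔ (x ∈ frontierA ∧ x ∉ ord)) →
    ord.Pairwise (pvLex dist) →
    (∀ u ∈ F, dist.getD u 0 = level) →
    (∀ k ∈ ord, dist.getD k 0 < level) →
    ((PySem.Set.ofList (frontierA ++ adjacency.flatMap (fun p => p.2))).filter
        (fun n => !(PySem.Set.contains ord n))).length < fA →
    F.length + ((PySem.Set.ofList (frontierA ++ adjacency.flatMap (fun p => p.2))).filter
        (fun n => !(dist.contains n))).length < fB →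
    bfsALoop adjacency fA (ord, ord, frontierA) =
      PySem.List.sorted2 (bfsQLoop adjacency fB (dist, F)).keys
        (fun n => (bfsQLoop adjacency fB (dist, F)).getD n 0) (fun n => n) false := by
  intro fA
  induction fA with
  | zero =>
    intro fB dist ord frontierA F level _ _ _ _ _ _ _ _ h8 _
    exact absurd h8 (Nat.not_lt_zero _)
  | succ fA ih =>
    intro fB dist ord frontierA F level h1 h2 hFnd hFord h3 h5 hlev h6 h8 h9
    have hkeysmem : ∀ x, x ∈ dist.keys ↔ (x ∈ ord ∨ x ∈ F) := by
      intro x; rw [h1.mem_iff, List.mem_append]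
    have hcontiff : ∀ x, dist.contains x = true ↔ (x ∈ ord ∨ x ∈ F) := by
      intro x; rw [PySem.Dict.contains_iff_mem_keys, hkeysmem]
    by_cases hfa : frontierA = []
    · -- A's frontier is empty: both loops stop
      subst hfa
      have hF : F = [] := by
        rw [List.eq_nil_iff_forall_not_mem]
        intro x hx
        exact absurd ((h3 x).mp hx).1 (List.not_mem_nil)
      subst hF
      rw [show bfsALoop adjacency (fA+1) (ord, ord, []) = ord from by simp [bfsALoop]]
      rw [pvQNil]
      exact (pvFinish dist ord (by simpa using h1.symm) h5).symm
    · -- A runs one layer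
      have hlayerPL : (PySem.List.sorted (PySem.Set.ofList frontierA) (fun x => x) false).Pairwise (· < ·) :=
        PySem.List.sorted_ofList_pairwise_lt frontierA
      set layer := PySem.List.sorted (PySem.Set.ofList frontierA) (fun x => x) false with hlayer
      have hlayerNodup : layer.Nodup := hlayerPL.imp (fun h => ne_of_lt h)
      have hlayermem : ∀ x, x ∈ layer ↔ x ∈ frontierA := by
        intro x
        rw [hlayer, PySem.List.mem_sorted, PySem.Set.mem_ofList]
      set New := layer.filter (fun n => !(PySem.Set.contains ord n)) with hNew
      have hNewPL : New.Pairwise (· < ·) := hlayerPL.filter _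
      have hNewNodup : New.Nodup := hNewPL.imp (fun h => ne_of_lt h)
      have hNewmem : ∀ x, x ∈ New ↔ (x ∈ frontierA ∧ x ∉ ord) := by
        intro x
        rw [hNew, pvMemFilter, hlayermem]
      have hNewNotOrd : ∀ x ∈ New, x ∉ ord := fun x hx => ((hNewmem x).mp hx).2
      have hFNew : ∀ x, x ∈ F ↔ x ∈ New := by
        intro x; rw [h3 x, hNewmem x]
      -- the inner fold of A
      have hinner := pvInner adjacency layer ord [] hlayerNodup
      set stA := layer.foldl (bfsAStep adjacency) (ord, ord, []) with hstA
      have hA : bfsALoop adjacency (fA+1) (ord, ord, frontierA) =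
          bfsALoop adjacency fA (stA.1, stA.2.1,
            PySem.List.sorted (PySem.Set.ofList stA.2.2) (fun x => x) false) := by
        simp only [bfsALoop]
        rw [if_neg (by simpa using hfa)]
      rw [hA, hinner.1.1, hinner.1.2, ← hNew]
      by_cases hNewNil : New = []
      · -- nothing new: A's next frontier is empty, B's queue is already empty
        have hallvis : ∀ n ∈ layer, PySem.Set.contains ord n = true := by
          intro n hn
          by_contra hc
          have hcf : PySem.Set.contains ord n = false := Bool.eq_false_iff.mpr hc
          have : n ∈ New := by rw [hNew]; exact List.mem_filter.mpr ⟨hn, by rw [hcf]; rfl⟩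
          rw [hNewNil] at this
          exact absurd this (List.not_mem_nil)
        have hstAeq : stA = (ord, ord, []) := by rw [hstA]; exact pvInnerAll adjacency layer _ hallvis
        have hF : F = [] := by
          rw [List.eq_nil_iff_forall_not_mem]
          intro x hx
          have := (hFNew x).mp hx
          rw [hNewNil] at this
          exact absurd this (List.not_mem_nil)
        subst hF
        rw [hNewNil, hstAeq]
        simp only [List.append_nil]
        rw [show PySem.List.sorted (PySem.Set.ofList ([] : List String)) (fun x => x) false = [] from rfl]
        rw [pvALoopNil, pvQNil]
        exact (pvFinish dist ord (by simpa using h1.symm) h5).symm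
      · -- at least one new node: A emits layer 'New', B pops the whole queue F (a permutation of New)
        have hFne : F ≠ [] := by
          obtain ⟨n, hn⟩ := List.exists_mem_of_ne_nil _ hNewNil
          intro hFnil
          exact absurd ((hFNew n).mpr hn) (by rw [hFnil]; exact List.not_mem_nil)
        -- B: run the queue through the whole block F
        obtain ⟨Fnew, hfold, hFnewNd, hFnewMem⟩ :=
          pvMacro adjacency level F dist []
            (fun u hu => ⟨hlev u hu, (hkeysmem u).mpr (Or.inr hu)⟩)
        set dist' := Fnew.foldl (fun dd x => dd.insert x (level+1)) dist with hdist'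
        have hFlen : F.length < fB := by omega
        have hB : bfsQLoop adjacency fB (dist, F) =
            bfsQLoop adjacency (fB - F.length) (dist', Fnew) := by
          have hfl := pvFlat adjacency F (fB - F.length) dist []
          rw [List.append_nil, Nat.sub_add_cancel (le_of_lt hFlen)] at hfl
          rw [hfl, hfold]
          simp
        rw [hB]
        have hFresh : ∀ x ∈ Fnew, x ∉ dist.keys := fun x hx => ((hFnewMem x).mp hx).2
        have hkeys' : dist'.keys = dist.keys ++ Fnew :=
          pvKeysFoldlInsert (level+1) Fnew dist hFnewNd hFresh
        have hgetD' : ∀ x, dist'.getD x 0 = if x ∈ Fnew then level+1 else dist.getD x 0 :=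
          fun x => pvGetDFoldlInsert (level+1) Fnew dist x 0
        have hkeysmem' : ∀ x, x ∈ dist'.keys ↔ (x ∈ ord ∨ x ∈ New ∨ x ∈ Fnew) := by
          intro x
          rw [hkeys', List.mem_append, hkeysmem, hFNew]
          tauto
        set frontierA' := PySem.List.sorted (PySem.Set.ofList stA.2.2) (fun x => x) false with hfrontierA'
        -- membership of A's next-layer list
        have hNLmem : ∀ x, x ∉ ord ++ New →
            (x ∈ stA.2.2 ↔ ∃ n ∈ New, x ∈ pvAdjGet adjacency n) := by
          intro x hx
          rw [hstA]
          have := hinner.2 x (by rw [← hNew]; exact hx)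
          rw [← hNew] at this
          rw [this]
          simp
        have hfrA'mem : ∀ x, x ∈ frontierA' ↔ x ∈ stA.2.2 := by
          intro x
          rw [hfrontierA', PySem.List.mem_sorted, PySem.Set.mem_ofList]
        -- the IH hypotheses
        have h1' : dist'.keys.Perm ((ord ++ New) ++ Fnew) := by
          rw [hkeys']
          refine List.Perm.append ?_ (List.Perm.refl Fnew)
          refine h1.trans (List.Perm.append_left ord ?_)
          refine (List.perm_ext_iff_of_nodup hFnd hNewNodup).mpr hFNew
        have h2' : (ord ++ New).Nodup :=
          List.Nodup.append h2 hNewNodup (fun x hx hx' => hNewNotOrd x hx' hx)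
        have hFord' : ∀ x ∈ Fnew, x ∉ ord ++ New := by
          intro x hx hmem
          refine hFresh x hx ((hkeysmem x).mpr ?_)
          rcases List.mem_append.mp hmem with h | h
          · exact Or.inl h
          · exact Or.inr ((hFNew x).mpr h)
        have h3' : ∀ x, x ∈ Fnew ↔ (x ∈ frontierA' ∧ x ∉ ord ++ New) := by
          intro x
          constructor
          · intro hx
            have hxo := hFord' x hx
            rcases (hFnewMem x).mp hx with ⟨⟨w, hw, hxw⟩, _⟩
            refine ⟨(hfrA'mem x).mpr ((hNLmem x hxo).mpr ⟨w, (hFNew w).mp hw, hxw⟩), hxo⟩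
          · rintro ⟨hfr, hnot⟩
            rcases (hNLmem x hnot).mp ((hfrA'mem x).mp hfr) with ⟨n, hn, hxn⟩
            refine (hFnewMem x).mpr ⟨⟨n, (hFNew n).mpr hn, hxn⟩, ?_⟩
            intro hk
            rcases (hkeysmem x).mp hk with h | h
            · exact hnot (List.mem_append.mpr (Or.inl h))
            · exact hnot (List.mem_append.mpr (Or.inr ((hFNew x).mp h)))
        have hOrdKeys : ∀ x ∈ ord, x ∉ Fnew :=
          fun x hx hxF => hFresh x hxF ((hkeysmem x).mpr (Or.inl hx))
        have hNewKeys : ∀ x ∈ New, x ∉ Fnew :=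
          fun x hx hxF => hFresh x hxF ((hkeysmem x).mpr (Or.inr ((hFNew x).mpr hx)))
        have h5' : (ord ++ New).Pairwise (pvLex dist') := by
          rw [List.pairwise_append]
          refine ⟨?_, ?_, ?_⟩
          · refine h5.imp_of_mem ?_
            intro a b ha hb hab
            unfold pvLex at hab ⊢
            rw [hgetD' a, hgetD' b, if_neg (hOrdKeys a ha), if_neg (hOrdKeys b hb)]
            exact hab
          · refine hNewPL.imp_of_mem ?_
            intro a b ha hb hab
            unfold pvLex
            rw [hgetD' a, hgetD' b, if_neg (hNewKeys a ha), if_neg (hNewKeys b hb)]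
            rw [hlev a ((hFNew a).mpr ha), hlev b ((hFNew b).mpr hb)]
            exact Or.inr ⟨rfl, hab⟩
          · intro a ha b hb
            unfold pvLex
            rw [hgetD' a, hgetD' b, if_neg (hOrdKeys a ha), if_neg (hNewKeys b hb)]
            rw [hlev b ((hFNew b).mpr hb)]
            exact Or.inl (h6 a ha)
        have hlev' : ∀ u ∈ Fnew, dist'.getD u 0 = level + 1 := by
          intro u hu
          rw [hgetD' u, if_pos hu]
        have h6' : ∀ k ∈ ord ++ New, dist'.getD k 0 < level + 1 := by
          intro k hk
          rcases List.mem_append.mp hk with hk | hk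
          · rw [hgetD' k, if_neg (hOrdKeys k hk)]
            have := h6 k hk
            omega
          · rw [hgetD' k, if_neg (hNewKeys k hk), hlev k ((hFNew k).mpr hk)]
            omega
        -- fuel bound for A
        have h8' : ((PySem.Set.ofList (frontierA' ++ adjacency.flatMap (fun p => p.2))).filter
            (fun n => !(PySem.Set.contains (ord ++ New) n))).length < fA := by
          set SA := (PySem.Set.ofList (frontierA ++ adjacency.flatMap (fun p => p.2))).filter
              (fun n => !(PySem.Set.contains ord n)) with hSA
          set SA' := (PySem.Set.ofList (frontierA' ++ adjacency.flatMap (fun p => p.2))).filter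
              (fun n => !(PySem.Set.contains (ord ++ New) n)) with hSA'
          have hSA'notmem : ∀ x ∈ SA', x ∉ ord ++ New := by
            intro x hx hmem
            rcases List.mem_filter.mp hx with ⟨_, hq⟩
            rw [Bool.not_eq_true'] at hq
            rw [← Bool.not_eq_true] at hq
            exact hq ((pvContainsIff _ x).mpr hmem)
          have hsub : ∀ x ∈ SA' ++ New, x ∈ SA := by
            intro x hx
            rcases List.mem_append.mp hx with hx | hx
            · rcases List.mem_filter.mp hx with ⟨hmem, _⟩
              have hxnot := hSA'notmem x hx
              have hxnotord : x ∉ ord := fun h => hxnot (List.mem_append.mpr (Or.inl h))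
              have hcf : PySem.Set.contains ord x = false :=
                Bool.eq_false_iff.mpr (fun h => hxnotord ((pvContainsIff ord x).mp h))
              refine List.mem_filter.mpr ⟨?_, by rw [hcf]; rfl⟩
              rw [PySem.Set.mem_ofList] at hmem ⊢
              rcases List.mem_append.mp hmem with hmem | hmem
              · rw [hfrA'mem] at hmem
                rcases (hNLmem x hxnot).mp hmem with ⟨n, _, hxn⟩
                exact List.mem_append.mpr (Or.inr (pvAdjGetSub adjacency n x hxn))
              · exact List.mem_append.mpr (Or.inr hmem)
            · rcases (hNewmem x).mp hx with ⟨hfr, hnord⟩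
              have hcf : PySem.Set.contains ord x = false :=
                Bool.eq_false_iff.mpr (fun h => hnord ((pvContainsIff ord x).mp h))
              refine List.mem_filter.mpr ⟨?_, by rw [hcf]; rfl⟩
              rw [PySem.Set.mem_ofList]
              exact List.mem_append.mpr (Or.inl hfr)
          have hndSA' : SA'.Nodup := (PySem.Set.nodup_ofList _).filter _
          have hndapp : (SA' ++ New).Nodup :=
            List.Nodup.append hndSA' hNewNodup
              (fun x hx hx' => hSA'notmem x hx (List.mem_append.mpr (Or.inr hx')))
          have hlenA : (SA' ++ New).length ≤ SA.length :=
            (List.subperm_of_subset hndapp hsub).length_le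
          have hNewlen : 0 < New.length := List.length_pos_iff.mpr hNewNil
          rw [List.length_append] at hlenA
          omega
        -- fuel bound for B
        have h9' : Fnew.length + ((PySem.Set.ofList (frontierA' ++ adjacency.flatMap (fun p => p.2))).filter
            (fun n => !(dist'.contains n))).length < fB - F.length := by
          set SB := (PySem.Set.ofList (frontierA ++ adjacency.flatMap (fun p => p.2))).filter
              (fun n => !(dist.contains n)) with hSB
          set SB' := (PySem.Set.ofList (frontierA' ++ adjacency.flatMap (fun p => p.2))).filter
              (fun n => !(dist'.contains n)) with hSB'
          have hSB'notmem : ∀ x ∈ SB', x ∉ dist'.keys := by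
            intro x hx hmem
            rcases List.mem_filter.mp hx with ⟨_, hq⟩
            rw [Bool.not_eq_true'] at hq
            rw [← Bool.not_eq_true] at hq
            exact hq ((PySem.Dict.contains_iff_mem_keys dist' x).mpr hmem)
          have hsub : ∀ x ∈ Fnew ++ SB', x ∈ SB := by
            intro x hx
            have hmk : ∀ y, y ∉ dist.keys → (!(dist.contains y)) = true := by
              intro y hy
              have : dist.contains y = false :=
                Bool.eq_false_iff.mpr (fun h => hy ((PySem.Dict.contains_iff_mem_keys dist y).mp h))
              rw [this]; rfl
            rcases List.mem_append.mp hx with hx | hx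
            · rcases (hFnewMem x).mp hx with ⟨⟨w, hw, hxw⟩, hnk⟩
              refine List.mem_filter.mpr ⟨?_, hmk x hnk⟩
              rw [PySem.Set.mem_ofList]
              exact List.mem_append.mpr (Or.inr (pvAdjGetSub adjacency w x hxw))
            · have hxk' := hSB'notmem x hx
              have hxk : x ∉ dist.keys := fun h => hxk' (by rw [hkeys']; exact List.mem_append.mpr (Or.inl h))
              have hxnot : x ∉ ord ++ New := by
                intro hmem
                refine hxk ((hkeysmem x).mpr ?_)
                rcases List.mem_append.mp hmem with h | h
                · exact Or.inl h
                · exact Or.inr ((hFNew x).mpr h)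
              rcases List.mem_filter.mp hx with ⟨hmem, _⟩
              refine List.mem_filter.mpr ⟨?_, hmk x hxk⟩
              rw [PySem.Set.mem_ofList] at hmem ⊢
              rcases List.mem_append.mp hmem with hmem | hmem
              · rw [hfrA'mem] at hmem
                rcases (hNLmem x hxnot).mp hmem with ⟨n, _, hxn⟩
                exact List.mem_append.mpr (Or.inr (pvAdjGetSub adjacency n x hxn))
              · exact List.mem_append.mpr (Or.inr hmem)
          have hndSB' : SB'.Nodup := (PySem.Set.nodup_ofList _).filter _
          have hndapp : (Fnew ++ SB').Nodup :=
            List.Nodup.append hFnewNd hndSB'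
              (fun x hx hx' => hSB'notmem x hx' (by rw [hkeys']; exact List.mem_append.mpr (Or.inr hx)))
          have hlenB : (Fnew ++ SB').length ≤ SB.length :=
            (List.subperm_of_subset hndapp hsub).length_le
          rw [List.length_append] at hlenB
          omega
        exact ih (fB - F.length) dist' (ord ++ New) frontierA' Fnew (level+1)
          h1' h2' hFnewNd hFord' h3' h5' hlev' h6' h8' h9'

theorem bfs_visit_py_spec : Claim_equal_bfs_visit_py := by
  unfold Claim_equal_bfs_visit_py
  intro seeds adjacency _
  unfold Spec_bfs_visit_py bfs_visit_py bfs_visit_py_alt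
  obtain ⟨F0, hst0, hF0nd, hF0mem⟩ := pvInnerQ 0 seeds PySem.Dict.empty []
  have hekeys : (PySem.Dict.empty : PySem.Dict String Int).keys = [] := by
    simp [PySem.Dict.keys, PySem.Dict.empty]
  have hF0mem' : ∀ x, x ∈ F0 ↔ x ∈ seeds := by
    intro x
    rw [hF0mem x, hekeys]
    simp
  simp only [hst0, List.nil_append]
  set dist0 : PySem.Dict String Int := F0.foldl (fun dd x => dd.insert x 0) PySem.Dict.empty with hdist0
  have hkeys0 : dist0.keys = F0 := by
    rw [hdist0, pvKeysFoldlInsert 0 F0 PySem.Dict.empty hF0nd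
      (fun x _ h => by rw [hekeys] at h; exact absurd h (List.not_mem_nil)), hekeys, List.nil_append]
  refine pvMainQ adjacency _ _ dist0 [] (PySem.List.sorted seeds (fun x => x) false) F0 0
    ?_ List.nodup_nil hF0nd ?_ ?_ List.Pairwise.nil ?_ ?_ ?_ ?_
  · rw [hkeys0, List.nil_append]
  · intro x _ h
    exact absurd h (List.not_mem_nil)
  · intro x
    rw [hF0mem' x, PySem.List.mem_sorted]
    simp
  · intro u hu
    rw [hdist0, pvGetDFoldlInsert 0 F0 PySem.Dict.empty u 0, if_pos hu]
  · intro k hk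
    exact absurd hk (List.not_mem_nil)
  · have hall : ∀ n : String, (!(PySem.Set.contains ([] : List String) n)) = true := by
      intro n
      have h0 : PySem.Set.contains ([] : List String) n = false :=
        Bool.eq_false_iff.mpr (fun h => absurd ((pvContainsIff [] n).mp h) (List.not_mem_nil))
      rw [h0]; rfl
    rw [List.filter_eq_self.mpr (fun a _ => hall a)]
    have hle : (PySem.Set.ofList (PySem.List.sorted seeds (fun x => x) false ++
        adjacency.flatMap (fun p => p.2))).length ≤
        (PySem.List.sorted seeds (fun x => x) false ++ adjacency.flatMap (fun p => p.2)).length :=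
      PySem.Set.length_ofList_le _
    rw [List.length_append, PySem.List.length_sorted, List.length_flatMap] at hle
    omega
  · set SB0 := (PySem.Set.ofList (PySem.List.sorted seeds (fun x => x) false ++
        adjacency.flatMap (fun p => p.2))).filter (fun n => !(dist0.contains n)) with hSB0
    have hSB0k : ∀ x ∈ SB0, x ∉ F0 := by
      intro x hx hxF
      rcases List.mem_filter.mp hx with ⟨_, hq⟩
      rw [Bool.not_eq_true'] at hq
      rw [← Bool.not_eq_true] at hq
      exact hq ((PySem.Dict.contains_iff_mem_keys dist0 x).mpr (hkeys0 ▸ hxF))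
    have hsub : ∀ x ∈ F0 ++ SB0, x ∈ PySem.Set.ofList (PySem.List.sorted seeds (fun x => x) false ++
        adjacency.flatMap (fun p => p.2)) := by
      intro x hx
      rcases List.mem_append.mp hx with hx | hx
      · rw [PySem.Set.mem_ofList, List.mem_append, PySem.List.mem_sorted]
        exact Or.inl ((hF0mem' x).mp hx)
      · exact (List.mem_filter.mp hx).1
    have hnd : (F0 ++ SB0).Nodup :=
      List.Nodup.append hF0nd ((PySem.Set.nodup_ofList _).filter _)
        (fun x hx hx' => hSB0k x hx' hx)
    have hlen : (F0 ++ SB0).length ≤ (PySem.Set.ofList (PySem.List.sorted seeds (fun x => x) false ++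
        adjacency.flatMap (fun p => p.2))).length :=
      (List.subperm_of_subset hnd hsub).length_le
    have hle2 := PySem.Set.length_ofList_le (PySem.List.sorted seeds (fun x => x) false ++
        adjacency.flatMap (fun p => p.2))
    rw [List.length_append] at hlen
    rw [List.length_append, PySem.List.length_sorted, List.length_flatMap] at hle2
    omega
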